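-- pv_equiv track=rewrite | github.com/eileenwho/bioinformatics | copyBlastResultsTerminalRun.py | trim_query
-- ===== SOURCE A (Python) =====
-- def trim_query(defline):
--     defline_split = defline.split("_")
--     defline_query_trimmed = ""
--     for section in defline_split:
--         if section == "Query":
--             #this gets rid of a trailing "_" and adds a newline to the end of the defline so the format will be correct
--             defline_query_trimmed=defline_query_trimmed[0:-1]
--             defline_query_trimmed += "\n"
--             break
--         else:
--             defline_query_trimmed += section
--             defline_query_trimmed += "_"
--     return defline_query_trimmed
-- ===== SOURCE B (Python) =====
-- def trim_query(defline):
--     sections = defline.split("_")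
--     if "Query" in sections:
--         i = sections.index("Query")
--         return "_".join(sections[:i]) + "\n"
--     return "_".join(sections) + "_"
-- ===== Notes on version B (the rewrite author's own statement) =====
-- stated objective: simpler
-- what changed: Replaces the accumulate-while-scanning loop (append each section plus '_', chop the trailing '_' on hitting 'Query') with a direct index/slice/join decomposition: find 'Query' in the split list and join the prefix before it.
import Mathlib
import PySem

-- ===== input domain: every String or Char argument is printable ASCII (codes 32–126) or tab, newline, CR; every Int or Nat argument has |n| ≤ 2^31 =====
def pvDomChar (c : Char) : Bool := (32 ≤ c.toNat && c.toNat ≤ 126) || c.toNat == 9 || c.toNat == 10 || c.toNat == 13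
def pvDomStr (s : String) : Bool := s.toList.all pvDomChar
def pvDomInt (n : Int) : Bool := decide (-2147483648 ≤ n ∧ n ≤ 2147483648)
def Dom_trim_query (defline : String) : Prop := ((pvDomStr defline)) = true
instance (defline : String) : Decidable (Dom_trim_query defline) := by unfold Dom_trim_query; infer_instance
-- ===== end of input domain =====

-- B replaces A's accumulate-and-chop loop with a split/index/slice/join decomposition (objective: simpler).

-- ===== PORT A =====
-- the 'for section in defline_split: … break' loop, with the accumulator string
def trimQueryLoop : List (List Char) → List Char → List Char
  | [], acc => acc
  | s :: rest, acc =>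
    if s = "Query".toList then
      -- defline_query_trimmed[0:-1] then += "\n", then break
      PySem.List.slice acc (some 0) (some (-1)) ++ "\n".toList
    else
      trimQueryLoop rest ((acc ++ s) ++ "_".toList)

def trim_query (defline : String) : String :=
  String.ofList (trimQueryLoop (PySem.Chars.splitOn defline.toList "_".toList) [])

-- ===== PORT B =====
def trim_query_alt (defline : String) : String :=
  let sections := PySem.Chars.splitOn defline.toList "_".toList
  -- '"Query" in sections' + 'sections.index("Query")' as one option-valued lookup
  match PySem.List.index? sections "Query".toList with
  | some i => String.ofList (PySem.Chars.join "_".toList (sections.take i) ++ "\n".toList)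
  | none => String.ofList (PySem.Chars.join "_".toList sections ++ "_".toList)

-- ===== PRECONDITION & SPEC =====
def Spec_trim_query (defline : String) (out : String) : Prop := out = trim_query_alt defline
instance (defline : String) (out : String) : Decidable (Spec_trim_query defline out) := by unfold Spec_trim_query; infer_instance

-- ===== CLAIM (what is proved, stated in full; the proofs are below) =====
def Claim_equal_trim_query : Prop := ∀ (defline : String), Dom_trim_query defline → Spec_trim_query defline (trim_query defline)

-- ===== LEMMAS AND PROOFS =====

-- each section with its trailing '_' appended, as A's loop builds them
def pvFlat (ts : List (List Char)) : List Char := ts.flatMap (fun s => s ++ ['_'])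

theorem pvFlat_cons (t : List Char) (ts : List (List Char)) :
    pvFlat (t :: ts) = t ++ '_' :: pvFlat ts := by
  simp [pvFlat]

theorem pvFlat_eq (ts : List (List Char)) (h : ts ≠ []) :
    pvFlat ts = PySem.Chars.join "_".toList ts ++ ['_'] := by
  induction ts with
  | nil => simp at h
  | cons t rest ih =>
    cases rest with
    | nil => simp [pvFlat, PySem.Chars.join_singleton]
    | cons u us =>
      rw [pvFlat_cons, ih (by simp), PySem.Chars.join_cons_cons]
      simp

theorem dropLast_pvFlat (ts : List (List Char)) :
    (pvFlat ts).dropLast = PySem.Chars.join "_".toList ts := by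
  by_cases h : ts = []
  · simp [h, pvFlat, PySem.Chars.join_nil]
  · rw [pvFlat_eq ts h, List.dropLast_concat]

theorem slice_zero_neg_one (acc : List Char) :
    PySem.List.slice acc (some 0) (some (-1)) = acc.dropLast := by
  simp [PySem.List.slice, List.dropLast_eq_take]

theorem slice_none_neg_one (acc : List Char) :
    PySem.List.slice acc none (some (-1)) = acc.dropLast := by
  simp [PySem.List.slice, List.dropLast_eq_take]

theorem trimQueryLoop_eq (ss : List (List Char)) (acc : List Char) :
    trimQueryLoop ss acc =
      match PySem.List.index? ss "Query".toList with
      | some i => (acc ++ pvFlat (ss.take i)).dropLast ++ "\n".toList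
      | none => acc ++ pvFlat ss := by
  induction ss generalizing acc with
  | nil => simp [trimQueryLoop, PySem.List.index?, pvFlat]
  | cons s rest ih =>
    by_cases hs : s = "Query".toList
    · subst hs
      rw [PySem.List.index?_cons_self]
      simp [trimQueryLoop, slice_zero_neg_one, slice_none_neg_one, pvFlat]
    · rw [PySem.List.index?_cons_of_ne rest hs]
      simp only [trimQueryLoop, if_neg hs, ih]
      cases h : PySem.List.index? rest "Query".toList with
      | none => simp [h, pvFlat_cons]
      | some i => simp [h, pvFlat_cons]

theorem splitOn_go_ne_nil (sep : List Char) (fuel : Nat) (l cur : List Char)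
    (acc : List (List Char)) : PySem.Chars.splitOn.go sep fuel l cur acc ≠ [] := by
  induction fuel generalizing l cur acc with
  | zero => simp [PySem.Chars.splitOn.go]
  | succ n ih =>
    cases l with
    | nil => simp [PySem.Chars.splitOn.go]
    | cons c rest =>
      rw [PySem.Chars.splitOn.go]
      split
      · exact ih _ _ _
      · exact ih _ _ _

theorem splitOn_ne_nil (s sep : List Char) : PySem.Chars.splitOn s sep ≠ [] := by
  unfold PySem.Chars.splitOn
  exact splitOn_go_ne_nil _ _ _ _ _

-- ===== VERDICT (by name: the statement is the Claim_ definition above) =====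
theorem trim_query_spec : Claim_equal_trim_query := by
  intro defline _
  unfold Spec_trim_query trim_query trim_query_alt
  rw [trimQueryLoop_eq]
  simp only [PySem.List.index?_eq_idxOf?]
  cases h : List.idxOf? "Query".toList (PySem.Chars.splitOn defline.toList "_".toList) with
  | some i =>
    dsimp only
    rw [List.nil_append, dropLast_pvFlat]
  | none =>
    dsimp only
    rw [List.nil_append, pvFlat_eq _ (splitOn_ne_nil defline.toList "_".toList)]
    simp
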